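-- pv_equiv track=rewrite | github.com/GambitBot/solver-minimax | src/solver/utils.py | invert_fen
-- ===== SOURCE A (Python) =====
-- def invert_fen(input_fen: str) -> str:
-- 	"""Inverts the board-state portion of an FEN string"""
-- 	fen_parts = input_fen.split(" ")
-- 	board_fen_parts = fen_parts[0].split("/")
-- 	board_fen_parts.reverse()
-- 	# Reverse the piece positions
-- 	for i in range(len(board_fen_parts)):
-- 		row = list(board_fen_parts[i])
-- 		row.reverse()
-- 		board_fen_parts[i] = "".join(row)
-- 	fen_parts[0] = "/".join(board_fen_parts)
-- 	# Reverse castling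
-- 	castle_list = list(fen_parts[2])
-- 	for i in range(len(castle_list)):
-- 		if castle_list[i].isupper():
-- 			# White castling
-- 			# If we have castling defined as King/Queen side, flip that
-- 			if castle_list[i] == "K":
-- 				castle_list[i] = "Q"
-- 			elif castle_list[i] == "Q":
-- 				castle_list[i] = "K"
-- 			else:
-- 				castle_list[i] = chr(72 - (ord(castle_list[i]) - 65))
-- 		else:
-- 			# Black castling
-- 			# If we have castling defined as King/Queen side, flip that
-- 			if castle_list[i] == "k":
-- 				castle_list[i] = "q"
-- 			elif castle_list[i] == "q":
-- 				castle_list[i] = "k"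
-- 			else:
-- 				castle_list[i] = chr(104 - (ord(castle_list[i]) - 97))
-- 	fen_parts[2] = "".join(castle_list)
-- 	return " ".join(fen_parts)
-- ===== SOURCE B (Python) =====
-- # Castling flip as a table precomputed once for all ASCII codes (the same values A's
-- # per-character arithmetic produces); the fields are collected by a hand-rolled
-- # single-pass splitter, field 0 is reversed in place ('/' is its own mirror image,
-- # so one reversal flips both the rank order and each rank), field 2 is rewritten
-- # through the table. No str.split, no per-rank passes.
-- _TABLE = {}
-- for _i in range(128):
--     _c = chr(_i)
--     if _c.isupper():
--         _TABLE[_c] = {"K": "Q", "Q": "K"}.get(_c, chr(137 - _i))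
--     else:
--         _TABLE[_c] = {"k": "q", "q": "k"}.get(_c, chr(201 - _i))
--
--
-- def invert_fen(input_fen: str) -> str:
--     """Inverts the board-state portion of an FEN string"""
--     fields = [[]]                      # characters of each space-separated field
--     for ch in input_fen:
--         if ch == " ":
--             fields.append([])
--         else:
--             fields[-1].append(ch)
--     fields[0].reverse()                # board: one reversal does rank order and ranks
--     fields[2] = [_TABLE[c] for c in fields[2]]   # castling (IndexError if missing)
--     return " ".join("".join(f) for f in fields)
-- ===== Notes on version B (the rewrite author's own statement) =====
-- stated objective: alternative
-- what changed: A's staged passes (str.split twice, list.reverse of the rank list and of each rank via index loops, '/'-rejoin, and an in-place if-chain loop over the castling field) are replaced by a hand-rolled single-pass field splitter, one in-place reversal of field 0 (valid because '/' is its own mirror image), and a castling rewrite through a translation table precomputed once for all ASCII codes.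
-- outside the precondition, e.g. on invert_fen(' '): A raises IndexError, B raises IndexError
import Mathlib
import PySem

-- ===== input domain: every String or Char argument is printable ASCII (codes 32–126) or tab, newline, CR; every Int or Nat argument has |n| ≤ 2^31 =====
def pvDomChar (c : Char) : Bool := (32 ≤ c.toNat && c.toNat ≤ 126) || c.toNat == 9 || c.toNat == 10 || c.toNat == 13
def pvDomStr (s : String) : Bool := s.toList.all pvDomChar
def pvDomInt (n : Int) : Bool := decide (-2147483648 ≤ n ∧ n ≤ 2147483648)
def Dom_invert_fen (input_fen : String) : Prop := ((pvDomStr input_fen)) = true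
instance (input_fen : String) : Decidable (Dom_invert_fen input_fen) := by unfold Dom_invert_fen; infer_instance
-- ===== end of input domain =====

-- B replaces A's staged split/reverse/rejoin passes by a hand-rolled one-pass field splitter,
-- a single in-place reversal of the board field ('/' is its own mirror image) and a castling
-- rewrite through a table precomputed once for all ASCII codes: an alternative algorithm.

-- ===== PORT A =====
-- the body of A's castling loop (the nested if on castle_list[i])
def pvFlipA (c : Char) : Char :=
  if PySem.Chars.isupper c then
    if c = 'K' then 'Q'
    else if c = 'Q' then 'K'
    else Char.ofNat (Int.toNat (72 - ((c.toNat : Int) - 65)))   -- chr(72 - (ord(c) - 65))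
  else
    if c = 'k' then 'q'
    else if c = 'q' then 'k'
    else Char.ofNat (Int.toNat (104 - ((c.toNat : Int) - 97)))  -- chr(104 - (ord(c) - 97))

def invert_fen (input_fen : String) : String :=
  let fen_parts := PySem.Chars.splitOn input_fen.toList [' ']
  let board_fen_parts := PySem.Chars.splitOn (PySem.List.pyGetD fen_parts 0 []) ['/']
  let board_fen_parts := board_fen_parts.reverse
  -- for i in range(len(board_fen_parts)): board_fen_parts[i] = "".join(reversed row)
  let board_fen_parts := (PySem.List.pyRange 0 (board_fen_parts.length : Int)).foldl
      (fun acc i => acc.set i.toNat ((PySem.List.pyGetD acc i []).reverse)) board_fen_parts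
  let fen_parts := fen_parts.set 0 (PySem.Chars.join ['/'] board_fen_parts)
  -- castle_list = list(fen_parts[2])  (Python raises IndexError when |fen_parts| < 3: Pre_)
  let castle_list := PySem.List.pyGetD fen_parts 2 []
  -- for i in range(len(castle_list)): castle_list[i] = <nested if> = pvFlipA castle_list[i]
  let castle_list := (PySem.List.pyRange 0 (castle_list.length : Int)).foldl
      (fun acc i => acc.set i.toNat (pvFlipA (PySem.List.pyGetD acc i ' '))) castle_list
  let fen_parts := fen_parts.set 2 castle_list
  String.ofList (PySem.Chars.join [' '] fen_parts)

-- ===== PORT B =====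
-- Source B's module-level table build: for i in range(128): _TABLE[chr(i)] = … (the small-dict
-- .get written as the two-way if it is)
def pvTable : PySem.Dict Char Char :=
  (PySem.List.pyRange 0 128 1).foldl (fun t i =>
    let c := Char.ofNat i.toNat
    t.insert c
      (if PySem.Chars.isupper c then
        (if c = 'K' then 'Q' else if c = 'Q' then 'K' else Char.ofNat (Int.toNat (137 - i)))
       else
        (if c = 'k' then 'q' else if c = 'q' then 'k' else Char.ofNat (Int.toNat (201 - i)))))
    PySem.Dict.empty

def invert_fen_alt (input_fen : String) : String :=
  -- hand-rolled splitter: fields = [[]]; for ch: append a new field on ' ', else extend the last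
  let fields := input_fen.toList.foldl
    (fun fs ch => if ch = ' ' then fs ++ [[]]
                  else fs.dropLast ++ [(fs.getLast?.getD []) ++ [ch]])
    [[]]
  -- fields[0].reverse()  (fields is never empty)
  let fields := fields.set 0 ((PySem.List.pyGetD fields 0 []).reverse)
  -- fields[2] = [_TABLE[c] for c in fields[2]]  (Python raises IndexError when
  -- there are fewer than three fields: Pre_; _TABLE[c] raises KeyError only for
  -- codes ≥ 128, which Dom_invert_fen excludes — getD with a default is exact on Dom)
  let fields := PySem.List.pySetD fields 2
      ((PySem.List.pyGetD fields 2 []).map (fun c => PySem.Dict.getD pvTable c c))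
  String.ofList (PySem.Chars.join [' '] fields)

-- ===== PRECONDITION & SPEC =====
-- Pre_ excludes exactly the inputs with fewer than two spaces, on which Python A raises
-- IndexError reading fen_parts[2] (split(" ") yields fewer than three fields there).
def Pre_invert_fen (input_fen : String) : Prop := 2 ≤ input_fen.toList.count ' '
instance (input_fen : String) : Decidable (Pre_invert_fen input_fen) := by unfold Pre_invert_fen; infer_instance
def pvWitness_invert_fen : String := "8/8/8/8 w KQkq - 0 1"

def Spec_invert_fen (input_fen : String) (out : String) : Prop := out = invert_fen_alt input_fen
instance (input_fen : String) (out : String) : Decidable (Spec_invert_fen input_fen out) := by unfold Spec_invert_fen; infer_instance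

-- ===== CLAIM (what is proved, stated in full; the proofs are below) =====
def Claim_equal_invert_fen : Prop := ∀ (input_fen : String), Dom_invert_fen input_fen → Pre_invert_fen input_fen → Spec_invert_fen input_fen (invert_fen input_fen)

-- ===== LEMMAS AND PROOFS =====

-- the value Source B's table holds at a character, as a pure function (proof-side only)
def pvFlipB (c : Char) : Char :=
  if PySem.Chars.isupper c then
    if c = 'K' then 'Q'
    else if c = 'Q' then 'K'
    else Char.ofNat (Int.toNat (137 - (c.toNat : Int)))
  else
    if c = 'k' then 'q'
    else if c = 'q' then 'k'
    else Char.ofNat (Int.toNat (201 - (c.toNat : Int)))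

-- the two arithmetics agree on every character (72-(x-65) = 137-x and 104-(x-97) = 201-x over ℤ)
lemma pvFlip_eq (c : Char) : pvFlipA c = pvFlipB c := by
  unfold pvFlipA pvFlipB
  split_ifs <;> first | rfl | (congr 1; omega)

-- Char.ofNat is a left inverse of toNat below 128
lemma pvToNat_ofNat_lt (n : Nat) (h : n < 128) : (Char.ofNat n).toNat = n := by
  unfold Char.ofNat
  rw [dif_pos (by constructor; omega)]
  rfl

-- the table built for codes 0…n-1 answers pvFlipB below n and the default above
lemma pvTable_aux (n : Nat) (hn : n ≤ 128) (c : Char) :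
    PySem.Dict.getD ((PySem.List.pyRange 0 (n : Int) 1).foldl (fun t i =>
      let c := Char.ofNat i.toNat
      t.insert c
        (if PySem.Chars.isupper c then
          (if c = 'K' then 'Q' else if c = 'Q' then 'K' else Char.ofNat (Int.toNat (137 - i)))
         else
          (if c = 'k' then 'q' else if c = 'q' then 'k' else Char.ofNat (Int.toNat (201 - i)))))
      PySem.Dict.empty) c c
    = if c.toNat < n then pvFlipB c else c := by
  induction n with
  | zero =>
    rw [PySem.List.pyRange_one_eq_nil (by omega)]
    simp [PySem.Dict.getD_empty]
  | succ n ih =>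
    rw [show ((n + 1 : Nat) : Int) = (n : Int) + 1 by push_cast; ring,
      PySem.List.pyRange_one_succ_right (by positivity), List.foldl_append]
    simp only [List.foldl_cons, List.foldl_nil, Int.toNat_natCast]
    rw [PySem.Dict.getD_insert]
    by_cases hc : c = Char.ofNat n
    · subst hc
      have ht : (Char.ofNat n).toNat = n := pvToNat_ofNat_lt n (by omega)
      rw [if_pos rfl, if_pos (show (Char.ofNat n).toNat < n + 1 by rw [ht]; omega)]
      simp [pvFlipB, ht]
    · rw [if_neg hc, ih (by omega)]
      have hne : c.toNat ≠ n := fun h => hc (by rw [← h, Char.ofNat_toNat])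
      by_cases h2 : c.toNat < n
      · rw [if_pos h2, if_pos (by omega)]
      · rw [if_neg h2, if_neg (by omega)]

lemma pvTable_getD (c : Char) (h : c.toNat < 128) :
    PySem.Dict.getD pvTable c c = pvFlipB c := by
  have := pvTable_aux 128 (le_refl _) c
  rw [if_pos h] at this
  exact this

-- joining with a separator after appending one more piece
lemma pvJoin_append_singleton (d : Char) (L : List (List Char)) (p : List Char) :
    PySem.Chars.join [d] (L ++ [p]) =
      if L = [] then p else PySem.Chars.join [d] L ++ d :: p := by
  induction L with
  | nil => simp [PySem.Chars.join_singleton]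
  | cons a L ih =>
    cases L with
    | nil => simp [PySem.Chars.join_cons_cons, PySem.Chars.join_singleton]
    | cons b t =>
      simp only [List.cons_append, PySem.Chars.join_cons_cons]
      rw [← List.cons_append, ih]
      simp

-- invariant of splitOn's worker: joining the pieces back restores the consumed input
lemma pvGo_join (d : Char) :
    ∀ (fuel : Nat) (l cur : List Char) (acc : List (List Char)), l.length < fuel →
    PySem.Chars.join [d] (PySem.Chars.splitOn.go [d] fuel l cur acc) =
      PySem.Chars.join [d] acc.reverse ++ (if acc = [] then [] else [d]) ++ cur.reverse ++ l := by
  intro fuel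
  induction fuel with
  | zero => intro l cur acc h; omega
  | succ fuel ih =>
    intro l cur acc h
    cases l with
    | nil =>
      show PySem.Chars.join [d] ((cur.reverse :: acc).reverse) = _
      rw [List.reverse_cons, pvJoin_append_singleton]
      by_cases hacc : acc = [] <;> simp [hacc]
    | cons c rest =>
      show PySem.Chars.join [d]
          (if List.isPrefixOf [d] (c :: rest) then
            PySem.Chars.splitOn.go [d] fuel (List.drop (List.length [d]) (c :: rest)) [] (cur.reverse :: acc)
           else PySem.Chars.splitOn.go [d] fuel rest (c :: cur) acc) = _
      by_cases hd : d = c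
      · subst hd
        have hpre : List.isPrefixOf [d] (d :: rest) = true := by
          simp [List.isPrefixOf]
        rw [hpre]
        simp only [if_true, List.length_cons, List.length_nil, List.drop_succ_cons, List.drop_zero]
        rw [ih rest [] (cur.reverse :: acc) (by simp at h ⊢; omega)]
        rw [List.reverse_cons, pvJoin_append_singleton]
        by_cases hacc : acc = [] <;> simp [hacc]
      · have hpre : List.isPrefixOf [d] (c :: rest) = false := by
          simp [List.isPrefixOf]; exact fun hh => hd hh
        rw [hpre]
        simp only [Bool.false_eq_true, if_false]
        rw [ih rest (c :: cur) acc (by simp at h ⊢; omega)]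
        simp

-- join is a left inverse of splitOn for a one-character separator
lemma pvJoin_splitOn (d : Char) (s : List Char) :
    PySem.Chars.join [d] (PySem.Chars.splitOn s [d]) = s := by
  show PySem.Chars.join [d] (PySem.Chars.splitOn.go [d] (s.length + 1) s [] []) = s
  rw [pvGo_join d (s.length + 1) s [] [] (by omega)]
  simp [PySem.Chars.join_nil]

-- the worker produces acc.length + 1 + (count of the separator) pieces
lemma pvGo_length (d : Char) :
    ∀ (fuel : Nat) (l cur : List Char) (acc : List (List Char)), l.length < fuel →
    (PySem.Chars.splitOn.go [d] fuel l cur acc).length = acc.length + 1 + l.count d := by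
  intro fuel
  induction fuel with
  | zero => intro l cur acc h; omega
  | succ fuel ih =>
    intro l cur acc h
    cases l with
    | nil =>
      show ((cur.reverse :: acc).reverse).length = _
      simp
    | cons c rest =>
      show (if List.isPrefixOf [d] (c :: rest) then
            PySem.Chars.splitOn.go [d] fuel (List.drop (List.length [d]) (c :: rest)) [] (cur.reverse :: acc)
           else PySem.Chars.splitOn.go [d] fuel rest (c :: cur) acc).length = _
      by_cases hd : d = c
      · subst hd
        have hpre : List.isPrefixOf [d] (d :: rest) = true := by
          simp [List.isPrefixOf]
        rw [hpre]
        simp only [if_true, List.length_cons, List.length_nil, List.drop_succ_cons, List.drop_zero]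
        rw [ih rest [] (cur.reverse :: acc) (by simp at h ⊢; omega)]
        simp only [List.count_cons]
        simp
        omega
      · have hpre : List.isPrefixOf [d] (c :: rest) = false := by
          simp [List.isPrefixOf]; exact fun hh => hd hh
        rw [hpre]
        simp only [Bool.false_eq_true, if_false]
        rw [ih rest (c :: cur) acc (by simp at h ⊢; omega)]
        have hcd : ¬ c = d := fun h => hd h.symm
        simp [hcd]

lemma pvSplitOn_length (d : Char) (s : List Char) :
    (PySem.Chars.splitOn s [d]).length = 1 + s.count d := by
  show (PySem.Chars.splitOn.go [d] (s.length + 1) s [] []).length = 1 + s.count d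
  rw [pvGo_length d (s.length + 1) s [] [] (by omega)]
  simp

-- no piece produced by the worker contains the separator
lemma pvGo_nosep (d : Char) :
    ∀ (fuel : Nat) (l cur : List Char) (acc : List (List Char)), l.length < fuel →
    d ∉ cur → (∀ p ∈ acc, d ∉ p) →
    ∀ p ∈ PySem.Chars.splitOn.go [d] fuel l cur acc, d ∉ p := by
  intro fuel
  induction fuel with
  | zero => intro l cur acc h; omega
  | succ fuel ih =>
    intro l cur acc h hcur hacc
    cases l with
    | nil =>
      show ∀ p ∈ ((cur.reverse :: acc).reverse), d ∉ p
      intro p hp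
      rw [List.mem_reverse, List.mem_cons] at hp
      rcases hp with hp | hp
      · subst hp; simpa using hcur
      · exact hacc p hp
    | cons c rest =>
      show ∀ p ∈ (if List.isPrefixOf [d] (c :: rest) then
            PySem.Chars.splitOn.go [d] fuel (List.drop (List.length [d]) (c :: rest)) [] (cur.reverse :: acc)
           else PySem.Chars.splitOn.go [d] fuel rest (c :: cur) acc), d ∉ p
      by_cases hd : d = c
      · subst hd
        have hpre : List.isPrefixOf [d] (d :: rest) = true := by
          simp [List.isPrefixOf]
        rw [hpre]
        simp only [if_true, List.length_cons, List.length_nil, List.drop_succ_cons, List.drop_zero]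
        refine ih rest [] (cur.reverse :: acc) (by simp at h ⊢; omega) (by simp) ?_
        intro p hp
        rw [List.mem_cons] at hp
        rcases hp with hp | hp
        · subst hp; simpa using hcur
        · exact hacc p hp
      · have hpre : List.isPrefixOf [d] (c :: rest) = false := by
          simp [List.isPrefixOf]; exact fun hh => hd hh
        rw [hpre]
        simp only [Bool.false_eq_true, if_false]
        refine ih rest (c :: cur) acc (by simp at h ⊢; omega) ?_ hacc
        intro hm
        rw [List.mem_cons] at hm
        rcases hm with hm | hm
        · exact hd hm
        · exact hcur hm

lemma pvSplitOn_nosep (d : Char) (s : List Char) :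
    ∀ p ∈ PySem.Chars.splitOn s [d], d ∉ p := by
  show ∀ p ∈ PySem.Chars.splitOn.go [d] (s.length + 1) s [] [], d ∉ p
  exact pvGo_nosep d (s.length + 1) s [] [] (by omega) (by simp) (by simp)

-- reversing every piece and the piece order reverses the joined string (the separator [d] is its own reverse)
lemma pvJoin_reverse (d : Char) (L : List (List Char)) :
    PySem.Chars.join [d] ((L.map List.reverse).reverse) = (PySem.Chars.join [d] L).reverse := by
  induction L with
  | nil => simp [PySem.Chars.join_nil]
  | cons p L ih =>
    cases L with
    | nil => simp [PySem.Chars.join_singleton]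
    | cons q t =>
      have h1 : ((p :: q :: t).map List.reverse).reverse
          = (((q :: t).map List.reverse).reverse) ++ [p.reverse] := by simp
      rw [h1, pvJoin_append_singleton]
      have hne : ((q :: t).map List.reverse).reverse ≠ [] := by simp
      rw [if_neg hne, ih, PySem.Chars.join_cons_cons]
      simp

-- A's in-place "for i in range(len(xs)): xs[i] = f(xs[i])" loop is List.map f
lemma pvLoop_set_map {α : Type} (f : α → α) (d : α) :
    ∀ (post pre : List α),
    (PySem.List.pyRange (pre.length : Int) ((pre.length + post.length : Nat) : Int) 1).foldl
        (fun acc i => acc.set i.toNat (f (PySem.List.pyGetD acc i d))) (pre ++ post)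
      = pre ++ post.map f := by
  intro post
  induction post with
  | nil => intro pre; simp [PySem.List.pyRange]
  | cons x post ih =>
    intro pre
    rw [PySem.List.pyRange_one_cons (by simp only [List.length_cons]; push_cast; omega)]
    simp only [List.foldl_cons]
    have hget : PySem.List.pyGetD (pre ++ x :: post) (pre.length : Int) d = x := by
      rw [PySem.List.pyGetD_natCast]
      simp [List.getD]
    have hset : (pre ++ x :: post).set ((pre.length : Int)).toNat (f x) = (pre ++ [f x]) ++ post := by
      rw [Int.toNat_natCast, List.set_append]
      simp
    rw [hget, hset]
    have h2 := ih (pre ++ [f x])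
    simp only [List.length_append, List.length_cons, List.length_nil, Nat.zero_add] at h2 ⊢
    rw [show ((pre.length : Int) + 1) = ((pre.length + 1 : Nat) : Int) by push_cast; ring]
    rw [show (pre.length + (post.length + 1) : Nat) = (pre.length + 1 + post.length : Nat) by omega]
    rw [h2]
    simp

lemma pvLoop_set_map' {α : Type} (f : α → α) (d : α) (xs : List α) :
    (PySem.List.pyRange 0 (xs.length : Int) 1).foldl
        (fun acc i => acc.set i.toNat (f (PySem.List.pyGetD acc i d))) xs = xs.map f := by
  have := pvLoop_set_map f d xs []
  simpa using this

-- the splitOn worker's accumulator is a reversed prefix of its result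
lemma pvGo_acc (d : Char) :
    ∀ (fuel : Nat) (l cur : List Char) (acc : List (List Char)), l.length < fuel →
    PySem.Chars.splitOn.go [d] fuel l cur acc
      = acc.reverse ++ PySem.Chars.splitOn.go [d] fuel l cur [] := by
  intro fuel
  induction fuel with
  | zero => intro l cur acc h; omega
  | succ fuel ih =>
    intro l cur acc h
    cases l with
    | nil =>
      show ((cur.reverse :: acc).reverse)
          = acc.reverse ++ ((cur.reverse :: ([] : List (List Char))).reverse)
      simp
    | cons c rest =>
      show (if List.isPrefixOf [d] (c :: rest) then
            PySem.Chars.splitOn.go [d] fuel (List.drop (List.length [d]) (c :: rest)) [] (cur.reverse :: acc)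
           else PySem.Chars.splitOn.go [d] fuel rest (c :: cur) acc)
          = acc.reverse ++ (if List.isPrefixOf [d] (c :: rest) then
            PySem.Chars.splitOn.go [d] fuel (List.drop (List.length [d]) (c :: rest)) [] (cur.reverse :: ([] : List (List Char)))
           else PySem.Chars.splitOn.go [d] fuel rest (c :: cur) [])
      by_cases hd : List.isPrefixOf [d] (c :: rest)
      · rw [if_pos hd, if_pos hd]
        have hlt : (List.drop (List.length [d]) (c :: rest)).length < fuel := by
          simp at h ⊢; omega
        rw [ih _ [] (cur.reverse :: acc) hlt, ih _ [] (cur.reverse :: []) hlt]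
        simp
      · rw [if_neg hd, if_neg hd, ih rest (c :: cur) acc (by simp at h ⊢; omega)]

-- Source B's one-pass splitter computes exactly Python's split(" ") (the splitOn worker)
lemma pvFold_splitter (d : Char) :
    ∀ (fuel : Nat) (l : List Char), l.length < fuel →
    ∀ (acc : List (List Char)) (cur : List Char),
    l.foldl (fun fs ch => if ch = d then fs ++ [[]]
                          else fs.dropLast ++ [(fs.getLast?.getD []) ++ [ch]]) (acc ++ [cur])
      = acc ++ PySem.Chars.splitOn.go [d] fuel l cur.reverse [] := by
  intro fuel
  induction fuel with
  | zero => intro l h; omega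
  | succ fuel ih =>
    intro l h acc cur
    cases l with
    | nil =>
      show acc ++ [cur] = acc ++ ((cur.reverse.reverse :: ([] : List (List Char))).reverse)
      simp
    | cons c rest =>
      rw [List.foldl_cons]
      show rest.foldl _ (if c = d then (acc ++ [cur]) ++ [[]]
            else (acc ++ [cur]).dropLast ++ [((acc ++ [cur]).getLast?.getD []) ++ [c]])
          = acc ++ (if List.isPrefixOf [d] (c :: rest) then
            PySem.Chars.splitOn.go [d] fuel (List.drop (List.length [d]) (c :: rest)) [] (cur.reverse.reverse :: [])
           else PySem.Chars.splitOn.go [d] fuel rest (c :: cur.reverse) [])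
      by_cases hd : c = d
      · subst hd
        have hpre : List.isPrefixOf [c] (c :: rest) = true := by
          simp [List.isPrefixOf]
        rw [if_pos rfl, if_pos hpre]
        simp only [List.length_cons, List.length_nil, List.drop_succ_cons, List.drop_zero,
          List.reverse_reverse]
        have hlt : rest.length < fuel := by simp at h ⊢; omega
        rw [ih rest hlt (acc ++ [cur]) [], pvGo_acc c fuel rest [] [cur] hlt]
        simp
      · have hpre : List.isPrefixOf [d] (c :: rest) = false := by
          simp [List.isPrefixOf]; exact fun hh => hd hh.symm
        rw [if_neg hd, hpre]
        simp only [Bool.false_eq_true, if_false, List.dropLast_concat,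
          List.getLast?_concat, Option.getD_some]
        have hlt : rest.length < fuel := by simp at h ⊢; omega
        rw [ih rest hlt acc (cur ++ [c])]
        simp

lemma pvFold_splitOn (d : Char) (s : List Char) :
    s.foldl (fun fs ch => if ch = d then fs ++ [[]]
                          else fs.dropLast ++ [(fs.getLast?.getD []) ++ [ch]]) [[]]
      = PySem.Chars.splitOn s [d] := by
  have := pvFold_splitter d (s.length + 1) s (by omega) [] []
  simpa using this

-- ===== VERDICT (by name: the statement is the Claim_ definition above) =====
theorem invert_fen_spec : Claim_equal_invert_fen := by
  intro input_fen hdom hpre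
  unfold Spec_invert_fen
  unfold Pre_invert_fen at hpre
  -- split(" ") has at least three fields
  have hlen : (PySem.Chars.splitOn input_fen.toList [' ']).length
      = 1 + input_fen.toList.count ' ' := pvSplitOn_length ' ' _
  obtain ⟨p0, p1, p2, rest, hparts⟩ :
      ∃ p0 p1 p2 rest, PySem.Chars.splitOn input_fen.toList [' '] = p0 :: p1 :: p2 :: rest := by
    rcases hl : PySem.Chars.splitOn input_fen.toList [' '] with _ | ⟨p0, _ | ⟨p1, _ | ⟨p2, rest⟩⟩⟩ <;>
      rw [hl] at hlen <;> simp at hlen <;> first | omega | exact ⟨p0, p1, p2, rest, rfl⟩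
  -- the tail of the string beyond the third field
  have hjoin3 : ∀ q : List Char, PySem.Chars.join [' '] (q :: rest)
      = q ++ (if rest = [] then [] else ' ' :: PySem.Chars.join [' '] rest) := by
    intro q
    cases rest with
    | nil => simp [PySem.Chars.join_singleton]
    | cons r rr => simp [PySem.Chars.join_cons_cons]
  have hs : input_fen.toList
      = p0 ++ ' ' :: (p1 ++ ' ' :: (p2 ++ (if rest = [] then [] else ' ' :: PySem.Chars.join [' '] rest))) := by
    conv_lhs => rw [← pvJoin_splitOn ' ' input_fen.toList, hparts]
    rw [PySem.Chars.join_cons_cons, PySem.Chars.join_cons_cons, hjoin3 p2]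
    simp
  -- the three fields are space-free
  have hnosep := pvSplitOn_nosep ' ' input_fen.toList
  rw [hparts] at hnosep
  have h0 : ' ' ∉ p0 := hnosep p0 (by simp)
  have h1 : ' ' ∉ p1 := hnosep p1 (by simp)
  have h2 : ' ' ∉ p2 := hnosep p2 (by simp)
  -- Dom: every character code is below 128, so the table answers pvFlipB = pvFlipA
  have hdomc : ∀ c ∈ input_fen.toList, c.toNat < 128 := by
    intro c hcmem
    unfold Dom_invert_fen pvDomStr at hdom
    have := List.all_eq_true.mp hdom c hcmem
    unfold pvDomChar at this
    simp at this
    omega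
  have hmap : p2.map (fun c => PySem.Dict.getD pvTable c c) = p2.map pvFlipA := by
    apply List.map_congr_left
    intro c hc
    rw [pvTable_getD c (hdomc c (by rw [hs]; simp [hc])), pvFlip_eq]
  -- A's board transformation is the whole-field reversal
  have hboard : PySem.Chars.join ['/']
      (((PySem.Chars.splitOn p0 ['/']).reverse).map List.reverse) = p0.reverse := by
    rw [List.map_reverse, pvJoin_reverse, pvJoin_splitOn]
  -- A's value
  have hget2 : PySem.List.pyGetD ((PySem.Chars.join ['/']
        ((PySem.List.pyRange 0 (((PySem.Chars.splitOn p0 ['/']).reverse).length : Int) 1).foldl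
          (fun acc i => acc.set i.toNat ((PySem.List.pyGetD acc i []).reverse))
          ((PySem.Chars.splitOn p0 ['/']).reverse))) :: p1 :: p2 :: rest) 2 [] = p2 := by
    rw [show (2 : Int) = ((2 : Nat) : Int) from rfl, PySem.List.pyGetD_natCast]
    simp [List.getD]
  have hA : invert_fen input_fen
      = String.ofList (PySem.Chars.join [' '] (p0.reverse :: p1 :: (p2.map pvFlipA) :: rest)) := by
    simp only [invert_fen, hparts, PySem.List.pyGetD_zero_cons, List.set]
    rw [hget2]
    simp only [pvLoop_set_map' List.reverse ([] : List Char),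
      pvLoop_set_map' pvFlipA ' ', hboard]
  -- B's value
  have hget2b : PySem.List.pyGetD (p0.reverse :: p1 :: p2 :: rest) 2 ([] : List Char) = p2 := by
    rw [show (2 : Int) = ((2 : Nat) : Int) from rfl, PySem.List.pyGetD_natCast]
    simp [List.getD]
  have hB : invert_fen_alt input_fen
      = String.ofList (PySem.Chars.join [' '] (p0.reverse :: p1 :: (p2.map pvFlipA) :: rest)) := by
    simp only [invert_fen_alt, pvFold_splitOn, hparts, PySem.List.pyGetD_zero_cons, List.set]
    rw [hget2b]
    rw [show (2 : Int) = ((2 : Nat) : Int) from rfl, PySem.List.pySetD_natCast]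
    simp only [List.set, hmap]
  rw [hA, hB]
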